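-- pv_equiv track=rewrite | github.com/bibickette/00_arachnida | arachnida/00_spider/src/ArgumentParser.py | is_valid_flag
-- ===== SOURCE A (Python) =====
-- def is_valid_flag(flag_value: str, char_used: set) -> set:
--     previous = None
--     if len(flag_value) == 1:
--         raise ValueError(f"Flag Error : {flag_value}\nMissing option")
--
--     previous = flag_value[0]
--     for char in flag_value[1:]:
--         if char != "r" and char != "l" and char != "p":
--             raise ValueError(f"Error : wrong char : {char}")
--         if (char != previous) and char in char_used:
--             raise ValueError(
--                 f"Flag Error : {flag_value}\nFlag already used: {char}"
--             )
--         char_used.add(char)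
--         previous = char
--
--     return char_used
-- ===== SOURCE B (Python) =====
-- def is_valid_flag(flag_value: str, char_used: set) -> set:
--     # Run-based: one check/add per maximal run of equal characters after the first char.
--     if len(flag_value) == 1:
--         raise ValueError(f"Flag Error : {flag_value}\nMissing option")
--     previous = flag_value[0]
--     i, n = 1, len(flag_value)
--     while i < n:
--         char = flag_value[i]
--         if char not in "rlp":
--             raise ValueError(f"Error : wrong char : {char}")
--         if char in char_used and char != previous:
--             raise ValueError(
--                 f"Flag Error : {flag_value}\nFlag already used: {char}"
--             )
--         char_used.add(char)
--         previous = char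
--         while i < n and flag_value[i] == char:
--             i += 1
--     return char_used
-- ===== Notes on version B (the rewrite author's own statement) =====
-- stated objective: alternative
-- what changed: B walks the flag string by maximal runs of equal characters, performing the validity/already-used checks and the single set-add once per run (an inner skip loop collapses duplicates), instead of A's per-character loop that re-checks and re-adds every duplicate.
import Mathlib
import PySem

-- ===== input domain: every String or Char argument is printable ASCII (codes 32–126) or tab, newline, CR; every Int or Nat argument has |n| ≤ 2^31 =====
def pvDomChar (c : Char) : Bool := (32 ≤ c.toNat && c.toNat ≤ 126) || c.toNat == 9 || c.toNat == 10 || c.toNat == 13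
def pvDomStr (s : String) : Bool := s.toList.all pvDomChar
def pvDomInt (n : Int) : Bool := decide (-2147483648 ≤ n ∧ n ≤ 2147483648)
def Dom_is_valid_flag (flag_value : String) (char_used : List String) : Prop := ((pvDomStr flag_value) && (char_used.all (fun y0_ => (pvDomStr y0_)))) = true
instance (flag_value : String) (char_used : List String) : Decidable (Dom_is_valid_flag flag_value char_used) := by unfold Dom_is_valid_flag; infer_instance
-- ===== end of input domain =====

-- B walks the flag by maximal runs of equal characters instead of per character; equivalence is about
-- the RETURN value only (the Python mutates char_used in place; both versions add the same elements).

-- ===== PORT A =====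
-- per-character loop of A; 'none' models the two ValueErrors (excluded by Pre_).
def pvA_loop (s : PySem.Set String) (previous : String) : List Char → Option (PySem.Set String)
  | [] => some s
  | c :: rest =>
    let cs := Char.toString c
    if cs ≠ "r" ∧ cs ≠ "l" ∧ cs ≠ "p" then none
    else if cs ≠ previous ∧ cs ∈ s then none
    else pvA_loop (PySem.Set.add s cs) cs rest

def is_valid_flag (flag_value : String) (char_used : List String) : List String :=
  match flag_value.toList with
  | [] => char_used            -- flag_value[0] raises IndexError (excluded by Pre_)
  | [_] => char_used           -- len == 1 raises ValueError (excluded by Pre_)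
  | c0 :: rest => (pvA_loop char_used (Char.toString c0) rest).getD char_used

-- ===== PORT B =====
-- inner 'while' of B: skip the rest of the current run
def pvB_skipRun (c : Char) : List Char → List Char
  | [] => []
  | x :: xs => if x = c then pvB_skipRun c xs else x :: xs

theorem pvB_skipRun_len_le (c : Char) (l : List Char) : (pvB_skipRun c l).length ≤ l.length := by
  induction l with
  | nil => simp [pvB_skipRun]
  | cons x xs ih =>
    rw [pvB_skipRun]
    split
    · exact Nat.le_succ_of_le ih
    · simp

-- outer loop of B: one check/add per maximal run
def pvB_loop (s : PySem.Set String) (previous : String) : List Char → Option (PySem.Set String)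
  | [] => some s
  | c :: rest =>
    let cs := Char.toString c
    -- 'char not in "rlp"' for the 1-char string cs is exactly this disjunction
    if ¬(cs = "r" ∨ cs = "l" ∨ cs = "p") then none
    else if cs ∈ s ∧ cs ≠ previous then none
    else pvB_loop (PySem.Set.add s cs) cs (pvB_skipRun c rest)
  termination_by l => l.length
  decreasing_by exact Nat.lt_succ_of_le (pvB_skipRun_len_le _ _)

def is_valid_flag_alt (flag_value : String) (char_used : List String) : List String :=
  let cs := flag_value.toList
  if cs.length = 1 then char_used   -- len == 1 raises ValueError (excluded by Pre_)
  else (pvB_loop char_used (Char.toString (cs.headD ' ')) cs.tail).getD char_used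
  -- on the empty string Python raises IndexError at flag_value[0] (excluded by Pre_)

-- ===== PRECONDITION & SPEC =====
-- Exactly the inputs on which the Python A returns normally: length ≥ 2, every char after the first
-- is 'r'/'l'/'p', and a char differing from its predecessor is neither in char_used nor equal to an
-- earlier (non-initial) char of the flag (it would have been added to the set already).
def Pre_is_valid_flag (flag_value : String) (char_used : List String) : Prop :=
  2 ≤ flag_value.toList.length ∧
  ((List.range (flag_value.toList.length - 1)).all (fun k =>
    let cs := flag_value.toList
    let c := cs.getD (k + 1) ' '
    (c = 'r' || c = 'l' || c = 'p') &&
    (c == cs.getD k ' ' ||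
      (!char_used.contains c.toString && !((cs.drop 1).take k).contains c))) = true)
instance (flag_value : String) (char_used : List String) : Decidable (Pre_is_valid_flag flag_value char_used) := by
  unfold Pre_is_valid_flag; infer_instance

def pvWitness_is_valid_flag : String × List String := ("-rrl", ["p"])

def Spec_is_valid_flag (flag_value : String) (char_used : List String) (out : List String) : Prop := out = is_valid_flag_alt flag_value char_used
instance (flag_value : String) (char_used : List String) (out : List String) : Decidable (Spec_is_valid_flag flag_value char_used out) := by unfold Spec_is_valid_flag; infer_instance

-- ===== CLAIM (what is proved, stated in full; the proofs are below) =====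
def Claim_equal_is_valid_flag : Prop := ∀ (flag_value : String) (char_used : List String), Dom_is_valid_flag flag_value char_used → Pre_is_valid_flag flag_value char_used → Spec_is_valid_flag flag_value char_used (is_valid_flag flag_value char_used)

-- ===== LEMMAS AND PROOFS =====

-- A's per-character loop is unchanged by dropping the duplicates of the run just processed:
-- each duplicate passes the char check, fails 'cs ≠ previous', and its add is a no-op.
theorem pvA_loop_skipRun (s : PySem.Set String) (c : Char)
    (hg : ¬(Char.toString c ≠ "r" ∧ Char.toString c ≠ "l" ∧ Char.toString c ≠ "p"))
    (hm : Char.toString c ∈ s) (l : List Char) :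
    pvA_loop s (Char.toString c) l = pvA_loop s (Char.toString c) (pvB_skipRun c l) := by
  induction l with
  | nil => rfl
  | cons x xs ih =>
    by_cases hx : x = c
    · subst hx
      rw [pvB_skipRun, if_pos rfl, ← ih]
      simp only [pvA_loop, if_neg hg]
      rw [if_neg (by simp), PySem.Set.add_of_mem hm]
    · rw [pvB_skipRun, if_neg hx]

-- the two loops compute the same result on every state and input
theorem pv_loops_eq_aux (n : Nat) : ∀ (l : List Char), l.length ≤ n → ∀ (s : PySem.Set String) (previous : String),
    pvA_loop s previous l = pvB_loop s previous l := by
  induction n with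
  | zero =>
    intro l hl s previous
    match l, hl with
    | [], _ => simp [pvA_loop, pvB_loop]
  | succ n ih =>
    intro l hl s previous
    match l with
    | [] => simp [pvA_loop, pvB_loop]
    | c :: rest =>
      rw [pvA_loop, pvB_loop]
      by_cases hg : Char.toString c = "r" ∨ Char.toString c = "l" ∨ Char.toString c = "p"
      · rw [if_neg (show ¬(Char.toString c ≠ "r" ∧ Char.toString c ≠ "l" ∧ Char.toString c ≠ "p") by tauto),
            if_neg (not_not_intro hg)]
        by_cases hu : Char.toString c ∈ s ∧ Char.toString c ≠ previous
        · rw [if_pos (show Char.toString c ≠ previous ∧ Char.toString c ∈ s from ⟨hu.2, hu.1⟩), if_pos hu]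
        · rw [if_neg (show ¬(Char.toString c ≠ previous ∧ Char.toString c ∈ s) from fun h => hu ⟨h.2, h.1⟩),
              if_neg hu]
          rw [pvA_loop_skipRun _ c (by tauto) (by rw [PySem.Set.mem_add]; right; rfl) rest]
          exact ih _ (le_trans (pvB_skipRun_len_le _ _) (Nat.le_of_succ_le_succ hl)) _ _
      · rw [if_pos (show Char.toString c ≠ "r" ∧ Char.toString c ≠ "l" ∧ Char.toString c ≠ "p" by tauto),
            if_pos hg]

theorem pv_loops_eq (l : List Char) (s : PySem.Set String) (previous : String) :
    pvA_loop s previous l = pvB_loop s previous l :=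
  pv_loops_eq_aux l.length l le_rfl s previous

-- ===== VERDICT (by name: the statement is the Claim_ definition above) =====
theorem is_valid_flag_spec : Claim_equal_is_valid_flag := by
  intro flag_value char_used _ _
  unfold Spec_is_valid_flag is_valid_flag is_valid_flag_alt
  cases h : flag_value.toList with
  | nil => simp [pvB_loop]
  | cons c0 rest =>
    cases rest with
    | nil => simp
    | cons c1 rest' => simp [pv_loops_eq]
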